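-- pv_equiv track=rewrite | github.com/btatkerson/xCite | core/CitationManagement.py | __getAlphaNumeric
-- ===== SOURCE A (Python) =====
-- def __getAlphaNumeric(string):
--     newStr = ""
--
--     detagged=""
--
--     inTag = False
--
--     for i in string:
--         if i == "<":
--             inTag = True
--
--         if not inTag:
--             detagged+=i
--
--         if i == ">":
--             inTag = False
--
--     for i in detagged:
--         if i.isalnum():
--             newStr+=i
--     return newStr
-- ===== SOURCE B (Python) =====
-- def __getAlphaNumeric(string):
--     # Single pass: a nested loop on the shared iterator consumes each <...> tag,
--     # alphanumeric characters outside tags are collected directly (no intermediate string).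
--     out = []
--     it = iter(string)
--     for c in it:
--         if c == "<":
--             for c2 in it:
--                 if c2 == ">":
--                     break
--         elif c.isalnum():
--             out.append(c)
--     return "".join(out)
-- ===== Notes on version B (the rewrite author's own statement) =====
-- stated objective: alternative
-- what changed: Replaces A's two-pass boolean state machine (build a detagged string with +=, then filter it) with a single pass whose nested loop on the shared iterator consumes each tag, collecting alphanumeric characters into a list joined once (no intermediate string, no repeated string concatenation).
import Mathlib
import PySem

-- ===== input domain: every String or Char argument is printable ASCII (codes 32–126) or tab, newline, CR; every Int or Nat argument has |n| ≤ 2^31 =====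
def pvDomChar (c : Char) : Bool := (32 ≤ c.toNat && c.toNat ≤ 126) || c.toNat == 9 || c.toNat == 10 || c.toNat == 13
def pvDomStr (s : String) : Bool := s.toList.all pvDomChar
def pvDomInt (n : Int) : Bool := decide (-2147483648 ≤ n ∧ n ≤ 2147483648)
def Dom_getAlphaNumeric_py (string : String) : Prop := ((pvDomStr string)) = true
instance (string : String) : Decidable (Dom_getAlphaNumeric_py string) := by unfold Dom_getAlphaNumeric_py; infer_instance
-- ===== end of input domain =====

-- B replaces A's two-pass flag state machine (detag, then filter) by one pass whose
-- nested loop consumes each tag; same return value, stated and proved below.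

-- ===== PORT A =====
-- literal port of A: fold the (detagged, inTag) state over the string, then a second
-- fold appends the alphanumeric characters of detagged.
-- the body of A's first for-loop (the three statements on the state), named so the
-- lemmas below can refer to it
def stepA (acc : List Char × Bool) (i : Char) : List Char × Bool :=
  let inTag := if i = '<' then true else acc.2
  let detagged := if inTag = false then acc.1 ++ [i] else acc.1
  let inTag := if i = '>' then false else inTag
  (detagged, inTag)

def getAlphaNumeric_py (string : String) : String :=
  let st := string.toList.foldl stepA ([], false)
  String.mk (st.1.foldl (fun newStr i => if PySem.Chars.isalnum i then newStr ++ [i] else newStr) [])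

-- ===== PORT B =====
-- port of Source B: the outer for-loop is gAltOut, the nested tag-consuming loop is gAltIn
-- (they recurse on the shared rest of the iterator).
mutual
  def gAltOut : List Char → List Char
    | [] => []
    | c :: cs => if c = '<' then gAltIn cs
                 else if PySem.Chars.isalnum c then c :: gAltOut cs
                 else gAltOut cs
  def gAltIn : List Char → List Char
    | [] => []
    | c :: cs => if c = '>' then gAltOut cs else gAltIn cs
end

def getAlphaNumeric_py_alt (string : String) : String :=
  String.mk (gAltOut string.toList)

-- ===== PRECONDITION & SPEC =====
def Spec_getAlphaNumeric_py (string : String) (out : String) : Prop := out = getAlphaNumeric_py_alt string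
instance (string : String) (out : String) : Decidable (Spec_getAlphaNumeric_py string out) := by unfold Spec_getAlphaNumeric_py; infer_instance

-- ===== CLAIM (what is proved, stated in full; the proofs are below) =====
def Claim_equal_getAlphaNumeric_py : Prop := ∀ (string : String), Dom_getAlphaNumeric_py string → Spec_getAlphaNumeric_py string (getAlphaNumeric_py string)

-- ===== LEMMAS AND PROOFS =====

-- the detagged string A's first loop produces, as a pair of mutual recursions
mutual
  def dtOut : List Char → List Char
    | [] => []
    | c :: cs => if c = '<' then dtIn cs else c :: dtOut cs
  def dtIn : List Char → List Char
    | [] => []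
    | c :: cs => if c = '>' then dtOut cs else dtIn cs
end

-- A's first fold computes d ++ dtOut/dtIn depending on the flag
theorem foldA_eq (cs : List Char) : ∀ d : List Char,
    (cs.foldl stepA (d, false)).1 = d ++ dtOut cs ∧
    (cs.foldl stepA (d, true)).1 = d ++ dtIn cs := by
  induction cs with
  | nil => intro d; simp [dtOut, dtIn]
  | cons c cs ih =>
    intro d
    refine ⟨?_, ?_⟩
    · rw [List.foldl_cons]
      by_cases h : c = '<'
      · subst h
        rw [show stepA (d, false) '<' = (d, true) from by simp [stepA], (ih d).2]
        simp [dtOut]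
      · rw [show stepA (d, false) c = (d ++ [c], false) from by simp [stepA, h],
            (ih (d ++ [c])).1]
        simp [dtOut, h]
    · rw [List.foldl_cons]
      by_cases hg : c = '>'
      · subst hg
        rw [show stepA (d, true) '>' = (d, false) from by simp [stepA], (ih d).1]
        simp [dtIn]
      · rw [show stepA (d, true) c = (d, true) from by simp [stepA, hg], (ih d).2]
        simp [dtIn, hg]

-- A's second fold is an alnum filter
theorem foldFilter (cs : List Char) : ∀ d : List Char,
    cs.foldl (fun newStr i => if PySem.Chars.isalnum i then newStr ++ [i] else newStr) d
      = d ++ cs.filter PySem.Chars.isalnum := by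
  induction cs with
  | nil => intro d; simp
  | cons c cs ih =>
    intro d
    by_cases h : PySem.Chars.isalnum c <;> simp [h, ih, List.filter_cons]

-- B's single pass is the filtered detag
theorem gAlt_eq_filter_dt (cs : List Char) :
    gAltOut cs = (dtOut cs).filter PySem.Chars.isalnum ∧
    gAltIn cs = (dtIn cs).filter PySem.Chars.isalnum := by
  induction cs with
  | nil => simp [gAltOut, gAltIn, dtOut, dtIn]
  | cons c cs ih =>
    constructor
    · by_cases h : c = '<'
      · simp [gAltOut, dtOut, h, ih.2]
      · by_cases ha : PySem.Chars.isalnum c <;>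
          simp [gAltOut, dtOut, h, ha, List.filter_cons, ih.1]
    · by_cases hg : c = '>' <;> simp [gAltIn, dtIn, hg, ih.1, ih.2]

-- ===== VERDICT (by name: the statement is the Claim_ definition above) =====
theorem getAlphaNumeric_py_spec : Claim_equal_getAlphaNumeric_py := by
  intro s _
  unfold Spec_getAlphaNumeric_py getAlphaNumeric_py getAlphaNumeric_py_alt
  simp only [(foldA_eq s.toList []).1, List.nil_append, foldFilter,
    (gAlt_eq_filter_dt s.toList).1]
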